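-- pv_equiv track=rewrite | github.com/alejandrogzi/thermut | bin/custom_build.py | nt_by_codon_position
-- ===== SOURCE A (Python) =====
-- def nt_by_codon_position(seq):
--     counts = [{'G': 0, 'C': 0, 'A':0, 'T':0} for _ in range(3)]
--
--     # Iterating over the sequence by codon position
--     for i in range(0, len(seq), 3):
--         codon = seq[i:i+3]
--         for pos in range(min(3, len(codon))):  # Make sure to stay within the sequence length
--             nucleotide = codon[pos]
--             if nucleotide in 'GCATgcat':
--                 counts[pos][nucleotide.upper()] += 1
--     return counts
-- ===== SOURCE B (Python) =====
-- def nt_by_codon_position(seq):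
--     result = []
--     for pos in range(3):
--         d = {'G': 0, 'C': 0, 'A': 0, 'T': 0}
--         for i in range(pos, len(seq), 3):
--             nt = seq[i]
--             if nt in 'GCATgcat':
--                 d[nt.upper()] += 1
--         result.append(d)
--     return result
-- ===== Notes on version B (the rewrite author's own statement) =====
-- stated objective: faster
-- what changed: Replaces the nested codon-by-codon loop (slice each codon, inner loop over positions, updating a list of three dicts) by three independent passes, one per codon position, each walking range(pos, len(seq), 3) and filling a single fresh counter dict; no per-codon string slicing or list indexing remains.
import Mathlib
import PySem

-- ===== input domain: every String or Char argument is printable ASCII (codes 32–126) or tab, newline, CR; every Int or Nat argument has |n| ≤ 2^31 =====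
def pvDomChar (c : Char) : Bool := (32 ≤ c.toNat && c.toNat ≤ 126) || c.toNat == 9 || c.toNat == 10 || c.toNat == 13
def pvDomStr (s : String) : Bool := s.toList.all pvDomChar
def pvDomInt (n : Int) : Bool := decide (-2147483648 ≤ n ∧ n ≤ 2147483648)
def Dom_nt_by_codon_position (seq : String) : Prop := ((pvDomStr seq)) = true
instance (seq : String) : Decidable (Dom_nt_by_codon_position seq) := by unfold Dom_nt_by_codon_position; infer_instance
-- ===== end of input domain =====

-- B counts each codon position in its own pass over range(pos, len, 3), instead of A's nested codon-by-codon loop; same results, different decomposition.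


-- shared helpers: the fresh counter {'G':0,'C':0,'A':0,'T':0} and the guarded
-- increment "if nt in 'GCATgcat': d[nt.upper()] += 1" that both Pythons perform verbatim
def ntInit : PySem.Dict String Int := PySem.Dict.mk [("G", 0), ("C", 0), ("A", 0), ("T", 0)]

def ntStep (d : PySem.Dict String Int) (c : Char) : PySem.Dict String Int :=
  if PySem.Chars.isIn [c] "GCATgcat".toList
  then d.modify (String.ofList [PySem.Chars.upperChar c]) 0 (· + 1)
  else d

-- ===== PORT A =====
def nt_by_codon_position (seq : String) : List (List (String × Int)) :=
  let cs := seq.toList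
  -- counts = [{'G':0,'C':0,'A':0,'T':0} for _ in range(3)]
  let counts : List (PySem.Dict String Int) := (List.range 3).map (fun _ => ntInit)
  -- for i in range(0, len(seq), 3): codon = seq[i:i+3]; for pos in range(min(3, len(codon))): …
  let counts := (PySem.List.pyRange 0 (PySem.Str.len seq) 3).foldl
    (fun counts i =>
      let codon := PySem.List.slice cs (some i) (some (i + 3))
      (PySem.List.pyRange 0 (min 3 (codon.length : Int)) 1).foldl
        (fun counts pos =>
          match PySem.List.pyGet? codon pos with
          | some nucleotide => counts.modify pos.toNat (fun d => ntStep d nucleotide)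
          | none => counts)  -- unreachable: pos < len(codon)
        counts)
    counts
  counts.map PySem.Dict.items

-- ===== PORT B =====
def nt_by_codon_position_alt (seq : String) : List (List (String × Int)) :=
  let cs := seq.toList
  -- for pos in range(3): d = {…}; for i in range(pos, len(seq), 3): …; result.append(d)
  ((PySem.List.pyRange 0 3 1).foldl
    (fun result pos =>
      let d := (PySem.List.pyRange pos (PySem.Str.len seq) 3).foldl
        (fun d i =>
          match PySem.List.pyGet? cs i with
          | some nt => ntStep d nt
          | none => d)  -- unreachable: i < len(seq)
        ntInit
      result ++ [d])
    []).map PySem.Dict.items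

-- ===== PRECONDITION & SPEC =====
def Spec_nt_by_codon_position (seq : String) (out : List (List (String × Int))) : Prop := out = nt_by_codon_position_alt seq
instance (seq : String) (out : List (List (String × Int))) : Decidable (Spec_nt_by_codon_position seq out) := by unfold Spec_nt_by_codon_position; infer_instance

-- ===== CLAIM (what is proved, stated in full; the proofs are below) =====
def Claim_equal_nt_by_codon_position : Prop := ∀ (seq : String), Dom_nt_by_codon_position seq → Spec_nt_by_codon_position seq (nt_by_codon_position seq)

-- ===== LEMMAS AND PROOFS =====

-- characters of a list at indices 0, 3, 6, …
def every3 : List Char → List Char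
  | [] => []
  | a :: r => a :: every3 (r.drop 2)
termination_by l => l.length
decreasing_by simp

-- step-3 range: induction forms
theorem pyRange3_nil {a b : Int} (h : b ≤ a) : PySem.List.pyRange a b 3 = [] := by
  rw [PySem.List.pyRange_of_pos a b (by norm_num)]
  simp [if_neg (by omega : ¬ a < b)]

theorem pyRange3_cons {a b : Int} (h : a < b) :
    PySem.List.pyRange a b 3 = a :: PySem.List.pyRange (a + 3) b 3 := by
  rw [PySem.List.pyRange_of_pos a b (by norm_num),
      PySem.List.pyRange_of_pos (a + 3) b (by norm_num)]
  have hcnt : (if a < b then ((b - a + 3 - 1) / 3).toNat else 0)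
      = (if a + 3 < b then ((b - (a + 3) + 3 - 1) / 3).toNat else 0) + 1 := by
    by_cases h3 : a + 3 < b <;> simp [h, h3] <;> try omega
  rw [hcnt, List.range_succ_eq_map, List.map_cons, List.map_map]
  refine congrArg₂ _ (by push_cast; ring) (List.map_congr_left ?_)
  intro k _
  simp [Function.comp]
  ring

theorem every3_cons (a : Char) (r : List Char) : every3 (a :: r) = a :: every3 (r.drop 2) := by
  rw [every3]

theorem modify3_0 {α : Type} (f : α → α) (a b c : α) : [a, b, c].modify 0 f = [f a, b, c] := rfl
theorem modify3_1 {α : Type} (f : α → α) (a b c : α) : [a, b, c].modify 1 f = [a, f b, c] := rfl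
theorem modify3_2 {α : Type} (f : α → α) (a b c : α) : [a, b, c].modify 2 f = [a, b, f c] := rfl

theorem pyGet?_cons0 {α : Type} (x : α) (l : List α) : PySem.List.pyGet? (x :: l) 0 = some x := by
  simp

theorem pyGet?_cons1 {α : Type} (x y : α) (l : List α) : PySem.List.pyGet? (x :: y :: l) 1 = some y := by
  rw [show (1 : Int) = ((1 : Nat) : Int) from rfl, PySem.List.pyGet?_natCast]
  simp

theorem pyGet?_cons2 {α : Type} (x y z : α) (l : List α) : PySem.List.pyGet? (x :: y :: z :: l) 2 = some z := by
  rw [show (2 : Int) = ((2 : Nat) : Int) from rfl, PySem.List.pyGet?_natCast]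
  simp

-- B's inner loop over range(pos, len(seq), 3) collects exactly the stride-3 characters
theorem bucketFold (cs : List Char) :
    ∀ (n p : Nat) (d : PySem.Dict String Int), cs.length - p ≤ n →
    (PySem.List.pyRange (p : Int) (cs.length : Int) 3).foldl
        (fun d i =>
          match PySem.List.pyGet? cs i with
          | some nt => ntStep d nt
          | none => d) d
      = (every3 (cs.drop p)).foldl ntStep d := by
  intro n
  induction n with
  | zero =>
    intro p d h
    have hle : cs.length ≤ p := by omega
    rw [pyRange3_nil (by exact_mod_cast hle), List.drop_eq_nil_of_le hle]
    simp [every3]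
  | succ n ih =>
    intro p d h
    by_cases hp : p < cs.length
    · rw [pyRange3_cons (by exact_mod_cast hp)]
      simp only [List.foldl_cons]
      rw [PySem.List.pyGet?_natCast, List.getElem?_eq_getElem hp]
      rw [show (p : Int) + 3 = ((p + 3 : Nat) : Int) by push_cast; ring]
      rw [ih (p + 3) _ (by omega)]
      have h3 : (cs.drop (p + 1)).drop 2 = cs.drop (p + 3) := by
        rw [List.drop_drop]
      rw [List.drop_eq_getElem_cons hp, every3_cons, h3, List.foldl_cons]
    · have hle : cs.length ≤ p := by omega
      rw [pyRange3_nil (by exact_mod_cast hle), List.drop_eq_nil_of_le hle]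
      simp [every3]

-- A's codon-by-codon loop, started at offset p, fills the three buckets with the stride-3 slices
theorem chunkFold (cs : List Char) :
    ∀ (n p : Nat) (d0 d1 d2 : PySem.Dict String Int), cs.length - p ≤ n →
    (PySem.List.pyRange (p : Int) (cs.length : Int) 3).foldl
        (fun counts i =>
          let codon := PySem.List.slice cs (some i) (some (i + 3))
          (PySem.List.pyRange 0 (min 3 (codon.length : Int)) 1).foldl
            (fun counts pos =>
              match PySem.List.pyGet? codon pos with
              | some nucleotide => counts.modify pos.toNat (fun d => ntStep d nucleotide)
              | none => counts)
            counts) [d0, d1, d2]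
      = [(every3 (cs.drop p)).foldl ntStep d0,
         (every3 (cs.drop (p + 1))).foldl ntStep d1,
         (every3 (cs.drop (p + 2))).foldl ntStep d2] := by
  intro n
  induction n with
  | zero =>
    intro p d0 d1 d2 h
    have hle : cs.length ≤ p := by omega
    rw [pyRange3_nil (by exact_mod_cast hle),
        List.drop_eq_nil_of_le hle, List.drop_eq_nil_of_le (by omega),
        List.drop_eq_nil_of_le (by omega)]
    simp [every3]
  | succ n ih =>
    intro p d0 d1 d2 h
    by_cases hp : p < cs.length
    · rw [pyRange3_cons (by exact_mod_cast hp)]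
      simp only [List.foldl_cons]
      rw [show (p : Int) + 3 = (p : Int) + ((3 : Nat) : Int) from by norm_num,
          PySem.List.slice_natCast_add]
      have hne : cs.drop p ≠ [] := by
        simp [List.drop_eq_nil_iff]; omega
      match hdp : cs.drop p with
      | [] => exact absurd hdp hne
      | [c0] =>
        have hlen : cs.length = p + 1 := by
          have := congrArg List.length hdp; simp at this; omega
        rw [pyRange3_nil (by rw [hlen]; push_cast; omega)]
        rw [List.drop_eq_nil_of_le (show cs.length ≤ p + 1 by omega),
            List.drop_eq_nil_of_le (show cs.length ≤ p + 2 by omega)]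
        have hr : PySem.List.pyRange 0 (min 3 (((List.take 3 [c0]).length) : Int)) 1 = [0] := by
          have hl : (((List.take 3 [c0]).length) : Int) = 1 := by norm_num
          rw [hl]; decide
        rw [hr]
        simp [show List.take 3 [c0] = [c0] from rfl, List.modify, every3]
      | [c0, c1] =>
        have hlen : cs.length = p + 2 := by
          have := congrArg List.length hdp; simp at this; omega
        rw [pyRange3_nil (by rw [hlen]; push_cast; omega)]
        rw [List.drop_eq_nil_of_le (show cs.length ≤ p + 2 by omega)]
        have hd1 : cs.drop (p + 1) = [c1] := by
          rw [← List.drop_drop, hdp]; rfl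
        rw [hd1]
        have hr : PySem.List.pyRange 0 (min 3 (((List.take 3 [c0, c1]).length) : Int)) 1 = [0, 1] := by
          have hl : (((List.take 3 [c0, c1]).length) : Int) = 2 := by norm_num
          rw [hl]; decide
        rw [hr]
        simp [show List.take 3 [c0, c1] = [c0, c1] from rfl, List.modify, every3]
      | c0 :: c1 :: c2 :: t3 =>
        have hlen : p + 3 ≤ cs.length := by
          have := congrArg List.length hdp; simp at this; omega
        have hd1 : cs.drop (p + 1) = c1 :: c2 :: t3 := by
          rw [← List.drop_drop, hdp]; rfl
        have hd2 : cs.drop (p + 2) = c2 :: t3 := by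
          rw [← List.drop_drop, hdp]; rfl
        have hd3 : cs.drop (p + 3) = t3 := by
          rw [← List.drop_drop, hdp]; rfl
        have hd4 : cs.drop (p + 3 + 1) = t3.drop 1 := by
          rw [← List.drop_drop, hd3]
        have hd5 : cs.drop (p + 3 + 2) = t3.drop 2 := by
          rw [← List.drop_drop, hd3]
        have hr : PySem.List.pyRange 0 (min 3 (((List.take 3 (c0 :: c1 :: c2 :: t3)).length) : Int)) 1
            = [0, 1, 2] := by
          have hl : (((List.take 3 (c0 :: c1 :: c2 :: t3)).length) : Int) = 3 := by
            norm_num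
          rw [hl]; decide
        rw [hr]
        rw [show List.take 3 (c0 :: c1 :: c2 :: t3) = [c0, c1, c2] from rfl]
        simp only [List.foldl_cons, List.foldl_nil, pyGet?_cons0, pyGet?_cons1, pyGet?_cons2,
                   Int.toNat_zero, Int.toNat_one, show (2 : Int).toNat = 2 from rfl,
                   modify3_0, modify3_1, modify3_2]
        rw [show ((p : Int) + ((3:Nat) : Int)) = ((p + 3 : Nat) : Int) by push_cast; ring]
        have ih' := ih (p + 3) (ntStep d0 c0) (ntStep d1 c1) (ntStep d2 c2) (by omega)
        simp only [] at ih'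
        rw [ih']
        rw [hd1, hd2, hd3, hd4, hd5]
        simp [every3_cons]
    · have hle : cs.length ≤ p := by omega
      rw [pyRange3_nil (by exact_mod_cast hle),
          List.drop_eq_nil_of_le hle, List.drop_eq_nil_of_le (by omega),
          List.drop_eq_nil_of_le (by omega)]
      simp [every3]

-- ===== VERDICT (by name: the statement is the Claim_ definition above) =====
theorem nt_by_codon_position_spec : Claim_equal_nt_by_codon_position := by
  intro seq _
  have hlen : PySem.Str.len seq = ((seq.toList.length : Nat) : Int) := by
    simp [PySem.Str.len]
  have hA := chunkFold seq.toList seq.toList.length 0 ntInit ntInit ntInit (by omega)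
  norm_num at hA
  have hB0 := bucketFold seq.toList seq.toList.length 0 ntInit (by omega)
  norm_num at hB0
  have hB1 := bucketFold seq.toList seq.toList.length 1 ntInit (by omega)
  norm_num at hB1
  have hB2 := bucketFold seq.toList seq.toList.length 2 ntInit (by omega)
  norm_num at hB2
  simp only [Spec_nt_by_codon_position, nt_by_codon_position, nt_by_codon_position_alt,
             hlen, show (List.range 3).map (fun _ => ntInit) = [ntInit, ntInit, ntInit] from rfl,
             show PySem.List.pyRange 0 3 1 = [(0 : Int), 1, 2] from by decide,
             List.foldl_cons, List.foldl_nil, String.length_toList]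
  rw [hA, hB0, hB1, hB2]
  simp
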